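-- pv_equiv track=rewrite | github.com/trquoctoann/GraduationThesis.Chatbot | src/models/entities/entities_recognizer.py | reformat_order_result
-- ===== SOURCE A (Python) =====
-- def reformat_order_result(predicted_result):
--     output_dict = {}
--     for index, (word, label) in enumerate(
--         zip(predicted_result["words"], predicted_result["label"])
--     ):
--         if label == "O":
--             continue
--         if label not in output_dict:
--             output_dict[label] = []
--         output_dict[label].append((word, index))
--     return output_dict
-- ===== SOURCE B (Python) =====
-- def reformat_order_result(predicted_result):
--     pairs = list(zip(predicted_result["words"], predicted_result["label"]))
--     order = dict.fromkeys(lab for _, lab in pairs if lab != "O")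
--     return {
--         lab: [(word, index) for index, (word, l) in enumerate(pairs) if l == lab]
--         for lab in order
--     }
-- ===== Notes on version B (the rewrite author's own statement) =====
-- stated objective: alternative
-- what changed: A streams over the zipped words/labels once, growing per-label lists via dict-membership checks; B makes a grouped two-phase pass: dedup the non-'O' labels in first-appearance order (dict.fromkeys), then build each label's (word, index) list with a separate comprehension over the enumerated pairs.
-- outside the precondition, e.g. on reformat_order_result({}): A raises KeyError, B raises KeyError
import Mathlib
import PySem

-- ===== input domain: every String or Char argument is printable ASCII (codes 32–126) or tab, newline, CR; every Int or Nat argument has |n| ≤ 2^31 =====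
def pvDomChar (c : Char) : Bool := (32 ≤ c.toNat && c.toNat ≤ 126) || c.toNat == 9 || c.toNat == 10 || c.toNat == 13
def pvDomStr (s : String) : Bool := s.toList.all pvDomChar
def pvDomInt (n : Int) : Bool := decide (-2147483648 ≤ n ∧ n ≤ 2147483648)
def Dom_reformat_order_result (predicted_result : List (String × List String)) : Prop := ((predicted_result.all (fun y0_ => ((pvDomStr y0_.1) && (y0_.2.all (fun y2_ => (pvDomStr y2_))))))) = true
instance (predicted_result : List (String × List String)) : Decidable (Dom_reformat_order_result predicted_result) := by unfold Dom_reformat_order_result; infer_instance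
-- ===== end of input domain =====

-- B replaces A's streaming dict-membership updates by a two-phase grouped pass
-- (dedup the non-"O" labels in first-appearance order, then gather each label's
-- (word, index) pairs with a comprehension); objective: alternative decomposition, same cost class.

-- ===== PORT A =====
def reformat_order_result (predicted_result : List (String × List String)) : List (String × List (String × Int)) :=
  match (PySem.Dict.mk predicted_result).get? "words", (PySem.Dict.mk predicted_result).get? "label" with
  | some words, some labels =>
      ((PySem.List.enumerate (words.zip labels)).foldl
        (fun d (p : Int × (String × String)) =>
          if p.2.2 == "O" then d
          else
            let d1 := if d.contains p.2.2 then d else d.insert p.2.2 []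
            d1.modify p.2.2 [] (fun v => v ++ [(p.2.1, p.1)]))
        PySem.Dict.empty).items
  | _, _ => []  -- unreachable under Pre_ (Python raises KeyError)

-- ===== PORT B =====
def reformat_order_result_alt (predicted_result : List (String × List String)) : List (String × List (String × Int)) :=
  -- the two lookups are Some under Pre_ (Python raises KeyError otherwise)
  (((PySem.Dict.mk predicted_result).get? "words").elim [] (fun words =>
    ((PySem.Dict.mk predicted_result).get? "label").elim [] (fun labels =>
      let pairs := words.zip labels
      let order := PySem.List.dedup ((pairs.map (fun q => q.2)).filter (fun lab => lab != "O"))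
      order.map (fun lab =>
        (lab, ((PySem.List.enumerate pairs).filter (fun p => p.2.2 == lab)).map (fun p => (p.2.1, p.1)))))))

-- ===== PRECONDITION & SPEC =====
-- Pre_: the Python A looks up predicted_result["words"] and predicted_result["label"]
-- and raises KeyError when either key is absent; exactly those inputs are excluded.
def Pre_reformat_order_result (predicted_result : List (String × List String)) : Prop :=
  "words" ∈ predicted_result.map Prod.fst ∧ "label" ∈ predicted_result.map Prod.fst
instance (predicted_result : List (String × List String)) : Decidable (Pre_reformat_order_result predicted_result) := by unfold Pre_reformat_order_result; infer_instance
def pvWitness_reformat_order_result : (List (String × List String)) :=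
  [("words", ["alpha", "beta", "gamma"]), ("label", ["X", "O", "X"])]

def Spec_reformat_order_result (predicted_result : List (String × List String)) (out : List (String × List (String × Int))) : Prop := out = reformat_order_result_alt predicted_result
instance (predicted_result : List (String × List String)) (out : List (String × List (String × Int))) : Decidable (Spec_reformat_order_result predicted_result out) := by unfold Spec_reformat_order_result; infer_instance

-- ===== CLAIM (what is proved, stated in full; the proofs are below) =====
def Claim_equal_reformat_order_result : Prop := ∀ (predicted_result : List (String × List String)), Dom_reformat_order_result predicted_result → Pre_reformat_order_result predicted_result → Spec_reformat_order_result predicted_result (reformat_order_result predicted_result)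

-- ===== LEMMAS AND PROOFS =====

-- A's "if absent, insert []; then append" equals a single Python-dict modify.
theorem setdefault_modify {κ ν : Type} [BEq κ] [LawfulBEq κ]
    (d : PySem.Dict κ (List ν)) (k : κ) (f : List ν → List ν) :
    (if d.contains k then d else d.insert k []).modify k [] f = d.modify k [] f := by
  rcases h : d.contains k with _ | _
  · simp only [Bool.false_eq_true, if_false]
    apply PySem.Dict.ext
    simp only [PySem.Dict.contains] at h
    have hfind : d.items.find? (fun p => p.1 == k) = none := by
      rw [List.find?_eq_none]; intro x hx; simpa using (List.any_eq_false.mp h) x hx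
    simp only [PySem.Dict.modify, PySem.Dict.insert, PySem.Dict.contains, PySem.Dict.getD,
      PySem.Dict.get?, h, Bool.false_eq_true, if_false, List.any_append, List.any_cons,
      List.any_nil, BEq.rfl, Bool.true_or, Bool.or_true, if_true, List.map_append,
      List.find?_append, hfind, Option.none_or, List.find?_cons, List.map_cons, List.map_nil,
      Option.map_some, Option.getD_some, Option.map_none, Option.getD_none]
    have hmap : d.items.map (fun p => if (p.1 == k) = true then (k, f []) else p) = d.items := by
      conv_rhs => rw [← List.map_id d.items]
      apply List.map_congr_left
      intro x hx
      simp [List.any_eq_false.mp h x hx]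
    simp [hmap]
  · simp

-- the core equivalence: A's grouping fold over any zipped pair list equals B's grouped pass
theorem grouping_eq (pairs : List (String × String)) :
    ((PySem.List.enumerate pairs).foldl
        (fun d (p : Int × (String × String)) =>
          if p.2.2 == "O" then d
          else
            let d1 := if d.contains p.2.2 then d else d.insert p.2.2 []
            d1.modify p.2.2 [] (fun v => v ++ [(p.2.1, p.1)]))
        PySem.Dict.empty).items =
      (PySem.List.dedup ((pairs.map (fun q => q.2)).filter (fun lab => lab != "O"))).map
        (fun lab =>
          (lab, ((PySem.List.enumerate pairs).filter (fun p => p.2.2 == lab)).map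
            (fun p => (p.2.1, p.1)))) := by
  have hstep : (fun (d : PySem.Dict String (List (String × Int))) (p : Int × (String × String)) =>
      if p.2.2 == "O" then d
      else
        let d1 := if d.contains p.2.2 then d else d.insert p.2.2 []
        d1.modify p.2.2 [] (fun v => v ++ [(p.2.1, p.1)]))
      = fun d p => if (p.2.2 != "O") = true then d.modify p.2.2 [] (fun v => v ++ [(p.2.1, p.1)]) else d := by
    funext d p
    rcases hb : p.2.2 == "O" with _ | _
    · simp only [hb, Bool.false_eq_true, if_false, bne, Bool.not_false, if_true]
      exact setdefault_modify d p.2.2 _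
    · simp only [hb, if_true, bne, Bool.not_true, Bool.false_eq_true, if_false]
  rw [hstep, ← List.foldl_filter]
  have hfm : ((PySem.List.enumerate pairs).filter (fun p => p.2.2 != "O")).foldl
        (fun d (p : Int × (String × String)) => d.modify p.2.2 [] (fun v => v ++ [(p.2.1, p.1)])) PySem.Dict.empty
      = (((PySem.List.enumerate pairs).filter (fun p => p.2.2 != "O")).map
          (fun p => (p.2.2, (p.2.1, p.1)))).foldl
        (fun d (q : String × (String × Int)) => d.modify q.1 [] (fun v => v ++ [q.2])) PySem.Dict.empty := by
    rw [List.foldl_map]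
  rw [hfm]
  set L := (((PySem.List.enumerate pairs).filter (fun p => p.2.2 != "O")).map
          (fun p => (p.2.2, (p.2.1, p.1)))) with hL
  have hnd : ((L.foldl (fun d (q : String × (String × Int)) => d.modify q.1 [] (fun v => v ++ [q.2])) PySem.Dict.empty)).keys.Nodup := by
    apply PySem.Dict.nodup_keys_foldl_modify_key L Prod.fst [] (fun _ q => (fun v => v ++ [q.2]))
    simp
  rw [PySem.Dict.items_eq_map_keys _ hnd []]
  have hkeys : ((L.foldl (fun d (q : String × (String × Int)) => d.modify q.1 [] (fun v => v ++ [q.2])) PySem.Dict.empty)).keys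
      = PySem.List.dedup ((pairs.map (fun q => q.2)).filter (fun lab => lab != "O")) := by
    have := PySem.Dict.keys_foldl_modify_key L Prod.fst [] (fun _ q => (fun v => v ++ [q.2])) PySem.Dict.empty
    rw [this]
    have hlm : L.map Prod.fst = (pairs.map (fun q => q.2)).filter (fun lab => lab != "O") := by
      rw [hL, List.map_map]
      have h1 : (pairs.map (fun q => q.2)).filter (fun lab => lab != "O")
          = (((PySem.List.enumerate pairs).map (fun p => p.2)).map (fun q => q.2)).filter (fun lab => lab != "O") := by
        rw [PySem.List.map_snd_enumerate]
      rw [h1, List.map_map, List.filter_map]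
      rfl
    rw [hlm]
    simp [PySem.Dict.keys_empty]
    rfl
  rw [hkeys]
  apply List.map_congr_left
  intro lab hmem
  have hlabne : (lab != "O") = true := by
    have := (PySem.List.mem_dedup _ _).mp hmem
    exact (List.mem_filter.mp this).2
  refine Prod.ext rfl ?_
  simp only
  rw [PySem.Dict.getD_foldl_modify_append L PySem.Dict.empty lab]
  simp only [PySem.Dict.getD_empty, List.nil_append]
  rw [hL, List.filter_map]
  rw [List.map_map]
  have : ((PySem.List.enumerate pairs).filter (fun p => p.2.2 != "O")).filter
        (fun p => ((fun (q : String × (String × Int)) => q.1 == lab) ∘ (fun p : Int × (String × String) => (p.2.2, (p.2.1, p.1)))) p)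
      = (PySem.List.enumerate pairs).filter (fun p => p.2.2 == lab) := by
    rw [List.filter_filter]
    apply List.filter_congr
    intro p _
    rcases hpb : p.2.2 == lab with _ | _
    · simp [hpb]
    · have : p.2.2 ≠ "O" := by
        have : p.2.2 = lab := by simpa using hpb
        rw [this]; simpa using hlabne
      simp [hpb, this]
  rw [this]
  rfl

-- ===== VERDICT (by name: the statement is the Claim_ definition above) =====
theorem reformat_order_result_spec : Claim_equal_reformat_order_result := by
  intro pr _ hpre
  unfold Spec_reformat_order_result
  obtain ⟨hw, hl⟩ := hpre
  unfold reformat_order_result reformat_order_result_alt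
  rcases hgw : (PySem.Dict.mk pr).get? "words" with _ | words
  · exact absurd ((PySem.Dict.get?_eq_none_iff_not_mem_keys _ _).mp hgw) (by simpa using hw)
  rcases hgl : (PySem.Dict.mk pr).get? "label" with _ | labels
  · exact absurd ((PySem.Dict.get?_eq_none_iff_not_mem_keys _ _).mp hgl) (by simpa using hl)
  exact grouping_eq (words.zip labels)
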